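-- pv_equiv track=rewrite | github.com/latedude2/P3_image_processing | openCV_version/venv/Scripts/finalCode/CardEvaluation.py | evaluateHandCards
-- ===== SOURCE A (Python) =====
-- cardValue = ["2", "3", "4", "5", "6", "7", "8", "9", "T", "J", "Q", "K", "A"]
--
-- def evaluateHandCards(firstValue, secondValue, firstCard, secondCard):
--     # firstValueIndex is the placement of the card's value according to the strength
--     valueIndexes = firstValueIndex, secondValueIndex = (100, 100) #random can be given, so it could be seen if it's changed when searching
--     i = 0  # used for searching
--     if firstValue != secondValue:  # if both card values are not the same, following code is done
--
--         for value in cardValue:  # checks through each element in the cardValue list, which is defined at the start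
--             if value == firstValue:
--                 firstValueIndex = i + 1
--             else:
--                 if value == secondValue:
--                     secondValueIndex = i + 1
--                 else:
--                     i += 1
--             # if values are already taken, compare them, compute the string and return it
--             if firstValueIndex != 100 and secondValueIndex != 100:
--                 # value is:
--                 # all possible combinations - multiplication of two card strengths and 9
--                 # 8 is for accounting to the same value cards, which are also possible, such as 8CJD and 8SJC (they're the same strength)
--                 value = firstValueIndex * secondValueIndex * 8
--                 value = 7642 - value
--                 stringToSend = str("9 " + str(firstCard) + str(secondCard) + " " + str(value))
--                 return str(stringToSend)
--
--     # if both cards are the same, there is a pair and another code is done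
--     if firstValue == secondValue:
--         valueIndexes = firstValueIndex, secondValueIndex = (100, 100)
--         for value in cardValue:
--             if value == firstValue:
--                 firstValueIndex = i
--                 secondValueIndex = i
--                 # value is:
--                 # all possible combinations - ranks of the high cards - multiplication of two card strengths and 9
--                 # 9 is for accounting to the same value pairs, which are also possible, such as ASAD and AHAC (they're the same strength)
--                 value = 7642 - 1277 - (firstValueIndex * secondValueIndex * 17)
--                 stringToSend = str("8 " + str(firstCard) + str(secondCard) + " " + str(value))
--                 return str(stringToSend)
--             else:
--                 i += 1
-- ===== SOURCE B (Python) =====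
-- def _rank(v):
--     # rank by character arithmetic: digit ranks come straight from the code point,
--     # only the five face cards need a scan of the short face string
--     if len(v) != 1:
--         return None
--     if "2" <= v <= "9":
--         return ord(v) - ord("2")
--     f = "TJQKA".find(v)
--     return 8 + f if f >= 0 else None
--
-- def evaluateHandCards(firstValue, secondValue, firstCard, secondCard):
--     p1 = _rank(firstValue)
--     if p1 is None:
--         return None
--     tag = firstCard + secondCard
--     if firstValue == secondValue:
--         return "8 " + tag + " " + str(6365 - 17 * p1 * p1)
--     p2 = _rank(secondValue)
--     if p2 is None:
--         return None
--     lo, hi = (p1, p2) if p1 < p2 else (p2, p1)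
--     return "9 " + tag + " " + str(7642 - 8 * (lo + 1) * hi)
-- ===== Notes on version B (the rewrite author's own statement) =====
-- stated objective: simpler
-- what changed: Removes the table scan entirely: each card's rank is computed arithmetically from its character code (ord(v)-ord('2') for digit ranks, 8+'TJQKA'.find(v) for faces) and the score comes from a closed formula, instead of A's stateful loop over the 13-entry list with a frozen i-counter and 100-sentinels.
import Mathlib
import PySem

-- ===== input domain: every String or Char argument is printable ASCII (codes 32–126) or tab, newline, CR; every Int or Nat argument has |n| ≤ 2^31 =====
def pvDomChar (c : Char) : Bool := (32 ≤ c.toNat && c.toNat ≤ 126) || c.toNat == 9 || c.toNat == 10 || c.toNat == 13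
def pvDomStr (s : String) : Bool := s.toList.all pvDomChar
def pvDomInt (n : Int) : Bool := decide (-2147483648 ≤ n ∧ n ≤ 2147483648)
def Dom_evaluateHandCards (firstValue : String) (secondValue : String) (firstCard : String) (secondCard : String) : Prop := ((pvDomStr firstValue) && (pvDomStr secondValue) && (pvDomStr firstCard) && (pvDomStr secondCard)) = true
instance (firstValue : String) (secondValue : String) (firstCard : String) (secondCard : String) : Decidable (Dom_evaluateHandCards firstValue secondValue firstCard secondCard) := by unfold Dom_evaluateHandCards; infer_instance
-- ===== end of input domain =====

-- B drops A's scan of the 13-entry rank table (stateful loop, frozen i-counter, 100-sentinels)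
-- and computes each card's rank arithmetically from its character code (digits) plus a short
-- face-string search, then applies a closed-form score; objective: simpler.

-- module-level constant of A
def cardValue : List String := ["2", "3", "4", "5", "6", "7", "8", "9", "T", "J", "Q", "K", "A"]

-- ===== PORT A =====
-- the 'for value in cardValue' loop of the distinct-values branch, state (firstValueIndex, secondValueIndex, i)
def loopA1 (firstValue secondValue firstCard secondCard : String) :
    List String → Int → Int → Int → Option String
  | [], _, _, _ => none
  | v :: rest, fvi, svi, i =>
    let fvi' := if v == firstValue then i + 1 else fvi
    let svi' := if v == firstValue then svi else if v == secondValue then i + 1 else svi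
    let i'   := if v == firstValue then i else if v == secondValue then i else i + 1
    if fvi' != 100 && svi' != 100 then
      some ("9 " ++ firstCard ++ secondCard ++ " " ++ PySem.Int.toStr (7642 - fvi' * svi' * 8))
    else
      loopA1 firstValue secondValue firstCard secondCard rest fvi' svi' i'

-- the 'for value in cardValue' loop of the pair branch (only the counter i is live state)
def loopA2 (firstValue firstCard secondCard : String) : List String → Int → Option String
  | [], _ => none
  | v :: rest, i =>
    if v == firstValue then
      some ("8 " ++ firstCard ++ secondCard ++ " " ++ PySem.Int.toStr (7642 - 1277 - i * i * 17))
    else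
      loopA2 firstValue firstCard secondCard rest (i + 1)

def evaluateHandCards (firstValue : String) (secondValue : String) (firstCard : String) (secondCard : String) : Option String :=
  -- if the distinct-values loop falls through, the following 'if firstValue == secondValue' is false: None
  if firstValue != secondValue then
    loopA1 firstValue secondValue firstCard secondCard cardValue 100 100 0
  else
    loopA2 firstValue firstCard secondCard cardValue 0

-- ===== PORT B =====
-- ord(v) for a length-1 string (rankB only uses it under its length-1 guard, where it is exact)
def pyOrd1 (v : String) : Int :=
  match v.toList with
  | [c] => (c.toNat : Int)
  | _ => 0

def rankB (v : String) : Option Int :=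
  -- Python's "2" <= v <= "9" is code-point lexicographic order: exactly ≤ on .toList (see PYSEM str COMPARISON)
  if PySem.Str.len v ≠ 1 then none
  else if ['2'] ≤ v.toList ∧ v.toList ≤ ['9'] then some (pyOrd1 v - 50)   -- ord(v) - ord("2")
  else
    let f := PySem.Str.find "TJQKA" v
    if f ≥ 0 then some (8 + f) else none

def evaluateHandCards_alt (firstValue : String) (secondValue : String) (firstCard : String) (secondCard : String) : Option String :=
  match rankB firstValue with
  | none => none
  | some p1 =>
    let tag := firstCard ++ secondCard
    if firstValue == secondValue then
      some ("8 " ++ tag ++ " " ++ PySem.Int.toStr (6365 - 17 * p1 * p1))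
    else
      match rankB secondValue with
      | none => none
      | some p2 =>
        let lohi := if p1 < p2 then (p1, p2) else (p2, p1)
        some ("9 " ++ tag ++ " " ++ PySem.Int.toStr (7642 - 8 * (lohi.1 + 1) * lohi.2))

-- ===== PRECONDITION & SPEC =====
def Spec_evaluateHandCards (firstValue : String) (secondValue : String) (firstCard : String) (secondCard : String) (out : Option String) : Prop := out = evaluateHandCards_alt firstValue secondValue firstCard secondCard
instance (firstValue : String) (secondValue : String) (firstCard : String) (secondCard : String) (out : Option String) : Decidable (Spec_evaluateHandCards firstValue secondValue firstCard secondCard out) := by unfold Spec_evaluateHandCards; infer_instance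

-- ===== CLAIM (what is proved, stated in full; the proofs are below) =====
def Claim_equal_evaluateHandCards : Prop := ∀ (firstValue : String) (secondValue : String) (firstCard : String) (secondCard : String), Dom_evaluateHandCards firstValue secondValue firstCard secondCard → Spec_evaluateHandCards firstValue secondValue firstCard secondCard (evaluateHandCards firstValue secondValue firstCard secondCard)

-- ===== LEMMAS AND PROOFS =====

-- first index ≥ i of fv in the list (position of the first match, offset by i)
def idxA (fv : String) : List String → Int → Option Int
  | [], _ => none
  | v :: rest, i => if v == fv then some i else idxA fv rest (i + 1)

theorem idxA_shift (fv : String) (L : List String) (i : Int) :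
    idxA fv L (i + 1) = (idxA fv L i).map (· + 1) := by
  induction L generalizing i with
  | nil => rfl
  | cons v rest ih =>
    simp only [idxA]
    by_cases h : v == fv <;> simp [h, ih]

theorem idxA_ge (fv : String) (L : List String) (i p : Int)
    (h : idxA fv L i = some p) : i ≤ p := by
  induction L generalizing i with
  | nil => simp [idxA] at h
  | cons v rest ih =>
    simp only [idxA] at h
    by_cases hv : v == fv
    · simp [hv] at h; omega
    · simp [hv] at h
      have := ih (i + 1) h
      omega

theorem idxA_eq_none (fv : String) (L : List String) (i : Int) (h : fv ∉ L) :
    idxA fv L i = none := by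
  induction L generalizing i with
  | nil => rfl
  | cons v rest ih =>
    have hv : ¬(v == fv) = true := by
      simp only [beq_iff_eq]; rintro rfl; exact h (List.mem_cons_self ..)
    simp only [idxA, hv, Bool.false_eq_true, if_false]
    exact ih (i + 1) (fun hm => h (List.mem_cons_of_mem _ hm))

-- pair-branch loop, characterised
theorem loopA2_char (fv fc sc : String) (L : List String) (i : Int) :
    loopA2 fv fc sc L i =
      (idxA fv L i).map (fun p =>
        "8 " ++ fc ++ sc ++ " " ++ PySem.Int.toStr (7642 - 1277 - p * p * 17)) := by
  induction L generalizing i with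
  | nil => rfl
  | cons v rest ih =>
    simp only [loopA2, idxA]
    by_cases h : v == fv <;> simp [h, ih]

-- distinct-values loop after firstValue was found (fvi = f ≠ 100, svi = 100)
theorem loopA1_after_first (fv sv fc sc : String) (L : List String) (i f : Int)
    (hmem : fv ∉ L) (hub : i + L.length ≤ 99) (hf : f ≠ 100) :
    loopA1 fv sv fc sc L f 100 i =
      (idxA sv L i).map (fun q =>
        "9 " ++ fc ++ sc ++ " " ++ PySem.Int.toStr (7642 - f * (q + 1) * 8)) := by
  induction L generalizing i with
  | nil => rfl
  | cons v rest ih =>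
    have hvfv : ¬(v == fv) = true := by
      simp only [beq_iff_eq]; rintro rfl; exact hmem (List.mem_cons_self ..)
    simp only [loopA1, hvfv, idxA]
    by_cases hvsv : v == sv
    · have hi1 : ¬(i + 1 = 100) := by simp only [List.length_cons] at hub; omega
      simp [hvsv, hf, hi1]
    · simp only [List.length_cons] at hub
      simp [hvsv]
      exact ih (i + 1) (fun hm => hmem (List.mem_cons_of_mem _ hm)) (by omega)

-- distinct-values loop after secondValue was found (fvi = 100, svi = s ≠ 100)
theorem loopA1_after_second (fv sv fc sc : String) (L : List String) (i s : Int)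
    (hmem : sv ∉ L) (hub : i + L.length ≤ 99) (hs : s ≠ 100) :
    loopA1 fv sv fc sc L 100 s i =
      (idxA fv L i).map (fun p =>
        "9 " ++ fc ++ sc ++ " " ++ PySem.Int.toStr (7642 - (p + 1) * s * 8)) := by
  induction L generalizing i with
  | nil => rfl
  | cons v rest ih =>
    have hvsv : ¬(v == sv) = true := by
      simp only [beq_iff_eq]; rintro rfl; exact hmem (List.mem_cons_self ..)
    simp only [loopA1, hvsv, idxA]
    by_cases hvfv : v == fv
    · have hi1 : ¬(i + 1 = 100) := by simp only [List.length_cons] at hub; omega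
      simp [hvfv, hs, hi1]
    · simp only [List.length_cons] at hub
      simp [hvfv]
      exact ih (i + 1) (fun hm => hmem (List.mem_cons_of_mem _ hm)) (by omega)

-- distinct-values loop from the initial sentinel state
theorem loopA1_char (fv sv fc sc : String) (L : List String) (i : Int)
    (hne : fv ≠ sv) (hnd : L.Nodup) (hub : i + L.length ≤ 99) :
    loopA1 fv sv fc sc L 100 100 i =
      match idxA fv L i, idxA sv L i with
      | some p, some q =>
          some ("9 " ++ fc ++ sc ++ " " ++
            PySem.Int.toStr (7642 - (min p q + 1) * max p q * 8))
      | _, _ => none := by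
  induction L generalizing i with
  | nil => rfl
  | cons v rest ih =>
    obtain ⟨hvr, hndr⟩ := List.nodup_cons.mp hnd
    simp only [List.length_cons] at hub
    by_cases hvfv : v == fv
    · have hfv : fv = v := (beq_iff_eq.mp hvfv).symm
      have hvsv : ¬(v == sv) = true := by
        simp only [beq_iff_eq]; rintro rfl; exact hne hfv
      simp only [loopA1, hvfv, if_true, hvsv, idxA]
      have hi1 : ¬(i + 1 = 100) := by omega
      rw [if_neg (by simp)]
      rw [loopA1_after_first fv sv fc sc rest i (i + 1)
        (hfv ▸ hvr) (by omega) hi1]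
      rw [idxA_shift]
      cases hq : idxA sv rest i with
      | none => simp
      | some q =>
        have hiq : i ≤ q := idxA_ge _ _ _ _ hq
        simp only [Option.map_some]
        have hmin : min i (q + 1) = i := by omega
        have hmax : max i (q + 1) = q + 1 := by omega
        simp [hmin, hmax]
    · by_cases hvsv : v == sv
      · have hsv : sv = v := (beq_iff_eq.mp hvsv).symm
        simp only [loopA1, hvfv, hvsv, if_true, idxA, Bool.false_eq_true, if_false]
        have hi1 : ¬(i + 1 = 100) := by omega
        rw [if_neg (by simp)]
        rw [loopA1_after_second fv sv fc sc rest i (i + 1)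
          (hsv ▸ hvr) (by omega) hi1]
        rw [idxA_shift]
        cases hp : idxA fv rest i with
        | none => simp
        | some p =>
          have hip : i ≤ p := idxA_ge _ _ _ _ hp
          simp only [Option.map_some]
          have hmin : min (p + 1) i = i := by omega
          have hmax : max (p + 1) i = p + 1 := by omega
          simp [hmin, hmax]
          ring_nf
      · simp only [loopA1, hvfv, hvsv, idxA, Bool.false_eq_true, if_false]
        rw [if_neg (by simp)]
        exact ih (i + 1) hndr (by omega)

-- two chars are equal iff their code points are
theorem char_eq_iff_toNat (c d : Char) : c = d ↔ c.toNat = d.toNat := by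
  constructor
  · rintro rfl; rfl
  · intro h
    exact Char.ext (UInt32.toNat_inj.mp h)

-- ≤ on single-char lists is ≤ on the chars' code points
theorem single_le_single (a b : Char) : ([a] ≤ [b]) ↔ a.toNat ≤ b.toNat := by
  constructor
  · intro h
    by_contra hb
    have hlt : b < a := by simp [Char.lt_def, UInt32.lt_iff_toNat_lt]; omega
    exact absurd (List.cons_lt_cons_iff.mpr (Or.inl hlt)) (not_lt_of_ge h)
  · intro h
    rcases Nat.lt_or_ge a.toNat b.toNat with hlt | hge
    · have : a < b := by simp [Char.lt_def, UInt32.lt_iff_toNat_lt]; omega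
      exact le_of_lt (List.cons_lt_cons_iff.mpr (Or.inl this))
    · have : a = b := (char_eq_iff_toNat a b).mpr (by omega)
      subst this; exact le_refl _

-- B's rank helper is exactly the first-match index scan over A's table
theorem rank_eq (v : String) : rankB v = idxA v cardValue 0 := by
  by_cases h2 : v = "2"; · subst h2; decide
  by_cases h3 : v = "3"; · subst h3; decide
  by_cases h4 : v = "4"; · subst h4; decide
  by_cases h5 : v = "5"; · subst h5; decide
  by_cases h6 : v = "6"; · subst h6; decide
  by_cases h7 : v = "7"; · subst h7; decide
  by_cases h8 : v = "8"; · subst h8; decide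
  by_cases h9 : v = "9"; · subst h9; decide
  by_cases hT : v = "T"; · subst hT; decide
  by_cases hJ : v = "J"; · subst hJ; decide
  by_cases hQ : v = "Q"; · subst hQ; decide
  by_cases hK : v = "K"; · subst hK; decide
  by_cases hA : v = "A"; · subst hA; decide
  -- v is none of the 13 ranks: both sides are none
  have hnm : v ∉ cardValue := by
    intro hm; fin_cases hm <;> simp_all
  rw [idxA_eq_none _ _ _ hnm]
  unfold rankB
  cases hv : v.toList with
  | nil => rw [if_pos (by simp [PySem.Str.len_eq, hv])]
  | cons c rest =>
    cases rest with
    | cons d rest' =>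
      rw [if_pos (by simp [PySem.Str.len_eq, hv]; omega)]
    | nil =>
      rw [if_neg (by simp [PySem.Str.len_eq, hv])]
      have hof : ∀ (w : String) (d : Char), w.toList = [d] → c = d → v = w := by
        intro w d hw hc
        exact String.ext_iff.mpr (by rw [hv, hc, hw])
      have hc2 : c ≠ '2' := fun h => h2 (hof _ _ (by decide) h)
      have hc3 : c ≠ '3' := fun h => h3 (hof _ _ (by decide) h)
      have hc4 : c ≠ '4' := fun h => h4 (hof _ _ (by decide) h)
      have hc5 : c ≠ '5' := fun h => h5 (hof _ _ (by decide) h)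
      have hc6 : c ≠ '6' := fun h => h6 (hof _ _ (by decide) h)
      have hc7 : c ≠ '7' := fun h => h7 (hof _ _ (by decide) h)
      have hc8 : c ≠ '8' := fun h => h8 (hof _ _ (by decide) h)
      have hc9 : c ≠ '9' := fun h => h9 (hof _ _ (by decide) h)
      have hcT : c ≠ 'T' := fun h => hT (hof _ _ (by decide) h)
      have hcJ : c ≠ 'J' := fun h => hJ (hof _ _ (by decide) h)
      have hcQ : c ≠ 'Q' := fun h => hQ (hof _ _ (by decide) h)
      have hcK : c ≠ 'K' := fun h => hK (hof _ _ (by decide) h)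
      have hcA : c ≠ 'A' := fun h => hA (hof _ _ (by decide) h)
      have hdig : ¬((['2'] : List Char) ≤ [c] ∧ [c] ≤ ['9']) := by
        rintro ⟨hlo, hhi⟩
        have hlon : ('2').toNat ≤ c.toNat := (single_le_single _ _).mp hlo
        have hhin : c.toNat ≤ ('9').toNat := (single_le_single _ _).mp hhi
        have n2 : c.toNat ≠ ('2').toNat := fun h => hc2 ((char_eq_iff_toNat c '2').mpr h)
        have n3 : c.toNat ≠ ('3').toNat := fun h => hc3 ((char_eq_iff_toNat c '3').mpr h)
        have n4 : c.toNat ≠ ('4').toNat := fun h => hc4 ((char_eq_iff_toNat c '4').mpr h)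
        have n5 : c.toNat ≠ ('5').toNat := fun h => hc5 ((char_eq_iff_toNat c '5').mpr h)
        have n6 : c.toNat ≠ ('6').toNat := fun h => hc6 ((char_eq_iff_toNat c '6').mpr h)
        have n7 : c.toNat ≠ ('7').toNat := fun h => hc7 ((char_eq_iff_toNat c '7').mpr h)
        have n8 : c.toNat ≠ ('8').toNat := fun h => hc8 ((char_eq_iff_toNat c '8').mpr h)
        have n9 : c.toNat ≠ ('9').toNat := fun h => hc9 ((char_eq_iff_toNat c '9').mpr h)
        have e2 : ('2').toNat = 50 := by decide
        have e3 : ('3').toNat = 51 := by decide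
        have e4 : ('4').toNat = 52 := by decide
        have e5 : ('5').toNat = 53 := by decide
        have e6 : ('6').toNat = 54 := by decide
        have e7 : ('7').toNat = 55 := by decide
        have e8 : ('8').toNat = 56 := by decide
        have e9 : ('9').toNat = 57 := by decide
        omega
      rw [if_neg hdig]
      have hfind : ¬(0 ≤ PySem.Str.find "TJQKA" v) := by
        intro hge
        have hinf : v.toList <:+: "TJQKA".toList := (PySem.Str.find_nonneg_iff _ _).mp hge
        rw [hv] at hinf
        have hmem : c ∈ "TJQKA".toList := (List.singleton_infix_iff c _).mp hinf
        have : c ∈ ['T', 'J', 'Q', 'K', 'A'] := by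
          rwa [show "TJQKA".toList = ['T', 'J', 'Q', 'K', 'A'] from by decide] at hmem
        simp only [List.mem_cons, List.not_mem_nil, or_false] at this
        rcases this with h | h | h | h | h
        · exact hcT h
        · exact hcJ h
        · exact hcQ h
        · exact hcK h
        · exact hcA h
      simp only [PySem.Str.find_eq,
        show "TJQKA".toList = ['T', 'J', 'Q', 'K', 'A'] from by decide] at hfind
      simp
      omega

-- ===== VERDICT (by name: the statement is the Claim_ definition above) =====
theorem evaluateHandCards_spec : Claim_equal_evaluateHandCards := by
  intro fv sv fc sc _
  unfold Spec_evaluateHandCards evaluateHandCards evaluateHandCards_alt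
  by_cases h : fv = sv
  · subst h
    simp only [bne_self_eq_false, Bool.false_eq_true, if_false, beq_self_eq_true, if_true,
      loopA2_char, rank_eq]
    cases idxA fv cardValue 0 with
    | none => rfl
    | some p =>
      simp only [Option.map_some]
      have : 7642 - 1277 - p * p * 17 = 6365 - 17 * p * p := by ring
      rw [this]; simp [String.append_assoc]
  · have hb : (fv != sv) = true := by simp [h]
    have hb' : ¬(fv == sv) = true := by simp [h]
    simp only [hb, if_true, rank_eq]
    rw [loopA1_char fv sv fc sc cardValue 0 h (by decide) (by decide)]
    cases hp : idxA fv cardValue 0 with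
    | none => rfl
    | some p1 =>
      cases hq : idxA sv cardValue 0 with
      | none => simp [hb']
      | some p2 =>
        simp only [hb', Bool.false_eq_true, if_false]
        by_cases hlt : p1 < p2
        · have hmin : min p1 p2 = p1 := by omega
          have hmax : max p1 p2 = p2 := by omega
          simp only [hlt, if_true, hmin, hmax]
          have : 7642 - (p1 + 1) * p2 * 8 = 7642 - 8 * (p1 + 1) * p2 := by ring
          rw [this]; simp [String.append_assoc]
        · have hmin : min p1 p2 = p2 := by omega
          have hmax : max p1 p2 = p1 := by omega
          simp only [hlt, if_false, hmin, hmax]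
          have : 7642 - (p2 + 1) * p1 * 8 = 7642 - 8 * (p2 + 1) * p1 := by ring
          rw [this]; simp [String.append_assoc]
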